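-- pv_equiv track=rewrite | github.com/burak1203/Cyber_Securty_LLM | src/utils.py | group_threats
-- ===== SOURCE A (Python) =====
-- def group_threats(threats):
--     grouped = {}
--     for threat in threats:
--         if "DDoS" in threat:
--             grouped.setdefault("DDoS", []).append(threat)
--         elif "Keylogger" in threat:
--             grouped.setdefault("Keylogger", []).append(threat)
--         elif "port" in threat.lower():
--             grouped.setdefault("Şüpheli Port", []).append(threat)
--         elif "protokol" in threat.lower():
--             grouped.setdefault("Diğer Tehditler", []).append(threat)
--         else:
--             grouped.setdefault("Trafik Analizi", []).append(threat)
--     return grouped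
-- ===== SOURCE B (Python) =====
-- RULES = [("DDoS", False, "DDoS"),
--          ("Keylogger", False, "Keylogger"),
--          ("port", True, "Şüpheli Port"),
--          ("protokol", True, "Diğer Tehditler")]
--
-- def _category(threat):
--     return next((cat for kw, ci, cat in RULES
--                  if kw in (threat.lower() if ci else threat)),
--                 "Trafik Analizi")
--
-- def group_threats(threats):
--     cats = [_category(t) for t in threats]
--     return {c: [t for t, ct in zip(threats, cats) if ct == c]
--             for c in dict.fromkeys(cats)}
-- ===== Notes on version B (the rewrite author's own statement) =====
-- stated objective: idiomatic
-- what changed: B replaces A's incremental setdefault/append loop by a rules-table categorizer plus a dict comprehension: categorize every threat once, then build the result from the deduplicated category list with one filter per category.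
import Mathlib
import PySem

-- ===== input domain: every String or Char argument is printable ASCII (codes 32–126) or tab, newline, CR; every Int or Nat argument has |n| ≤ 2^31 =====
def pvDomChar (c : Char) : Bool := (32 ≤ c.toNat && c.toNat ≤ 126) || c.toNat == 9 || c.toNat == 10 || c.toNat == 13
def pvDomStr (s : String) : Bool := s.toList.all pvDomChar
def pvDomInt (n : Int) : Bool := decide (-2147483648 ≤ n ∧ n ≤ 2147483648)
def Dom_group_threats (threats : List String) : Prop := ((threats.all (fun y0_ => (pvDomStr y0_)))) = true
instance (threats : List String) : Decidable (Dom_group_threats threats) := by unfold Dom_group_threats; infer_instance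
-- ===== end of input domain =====

-- B rebuilds the grouping as a dict comprehension over a rules table (categorize each threat once,
-- then deduplicated categories + a filter per category) instead of A's incremental setdefault loop;
-- objective: idiomatic/alternative, same result.

-- ===== PORT A =====
def group_threats (threats : List String) : List (String × List String) :=
  (threats.foldl (fun grouped threat =>
    if PySem.Str.isIn "DDoS" threat then
      grouped.modify "DDoS" [] (· ++ [threat])
    else if PySem.Str.isIn "Keylogger" threat then
      grouped.modify "Keylogger" [] (· ++ [threat])
    else if PySem.Str.isIn "port" (PySem.Str.lower threat) then
      grouped.modify "Şüpheli Port" [] (· ++ [threat])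
    else if PySem.Str.isIn "protokol" (PySem.Str.lower threat) then
      grouped.modify "Diğer Tehditler" [] (· ++ [threat])
    else
      grouped.modify "Trafik Analizi" [] (· ++ [threat])) PySem.Dict.empty).items

-- ===== PORT B =====
def pvRules : List (String × Bool × String) :=
  [("DDoS", false, "DDoS"), ("Keylogger", false, "Keylogger"),
   ("port", true, "Şüpheli Port"), ("protokol", true, "Diğer Tehditler")]

def pvCategory (threat : String) : String :=
  ((pvRules.find? (fun r =>
      PySem.Str.isIn r.1 (if r.2.1 then PySem.Str.lower threat else threat))).map
    (fun r => r.2.2)).getD "Trafik Analizi"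

def group_threats_alt (threats : List String) : List (String × List String) :=
  let cats := threats.map pvCategory
  (PySem.List.dedup cats).map (fun c =>
    (c, ((threats.zip cats).filter (fun p => p.2 == c)).map (fun p => p.1)))

-- ===== PRECONDITION & SPEC =====
def Spec_group_threats (threats : List String) (out : List (String × List String)) : Prop := out = group_threats_alt threats
instance (threats : List String) (out : List (String × List String)) : Decidable (Spec_group_threats threats out) := by unfold Spec_group_threats; infer_instance

-- ===== CLAIM (what is proved, stated in full; the proofs are below) =====
def Claim_equal_group_threats : Prop := ∀ (threats : List String), Dom_group_threats threats → Spec_group_threats threats (group_threats threats)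

-- ===== LEMMAS AND PROOFS =====

-- A's branch chain picks exactly the category pvCategory computes from the rules table
lemma step_eq : (fun (grouped : PySem.Dict String (List String)) (threat : String) =>
    if PySem.Str.isIn "DDoS" threat then
      grouped.modify "DDoS" [] (· ++ [threat])
    else if PySem.Str.isIn "Keylogger" threat then
      grouped.modify "Keylogger" [] (· ++ [threat])
    else if PySem.Str.isIn "port" (PySem.Str.lower threat) then
      grouped.modify "Şüpheli Port" [] (· ++ [threat])
    else if PySem.Str.isIn "protokol" (PySem.Str.lower threat) then
      grouped.modify "Diğer Tehditler" [] (· ++ [threat])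
    else
      grouped.modify "Trafik Analizi" [] (· ++ [threat]))
  = fun grouped threat => grouped.modify (pvCategory threat) [] (· ++ [threat]) := by
  funext grouped threat
  simp only [pvCategory, pvRules, List.find?]
  split_ifs <;> simp_all

lemma keys_A (threats : List String) :
    (threats.foldl (fun d t => d.modify (pvCategory t) [] (· ++ [t])) PySem.Dict.empty).keys
      = PySem.List.dedup (threats.map pvCategory) := by
  rw [PySem.Dict.keys_foldl_modify_key]
  simp [PySem.Dict.keys_empty, PySem.Set.update, PySem.Set.ofList_eq_foldl,
        PySem.List.dedup_eq_ofList]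

lemma nodup_keys_A (threats : List String) :
    (threats.foldl (fun d t => d.modify (pvCategory t) [] (· ++ [t])) PySem.Dict.empty).keys.Nodup := by
  exact PySem.Dict.nodup_keys_foldl_modify_key threats pvCategory []
    (fun d t => (· ++ [t])) PySem.Dict.empty (by simp)

lemma getD_A (threats : List String) (c : String) :
    (threats.foldl (fun d t => d.modify (pvCategory t) [] (· ++ [t])) PySem.Dict.empty).getD c []
      = (threats.filter (fun t => pvCategory t == c)) := by
  have h : threats.foldl (fun d t => d.modify (pvCategory t) [] (· ++ [t])) PySem.Dict.empty
      = (threats.map (fun t => (pvCategory t, t))).foldl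
          (fun d p => d.modify p.1 [] (· ++ [p.2])) PySem.Dict.empty := by
    rw [List.foldl_map]
  rw [h, PySem.Dict.getD_foldl_modify_append]
  simp [PySem.Dict.getD_empty, List.filter_map, Function.comp_def]

lemma filter_zip (threats : List String) (c : String) :
    ((threats.zip (threats.map pvCategory)).filter (fun p => p.2 == c)).map (fun p => p.1)
      = threats.filter (fun t => pvCategory t == c) := by
  induction threats with
  | nil => simp
  | cons t ts ih =>
    simp only [List.map_cons, List.zip_cons_cons, List.filter_cons]
    by_cases h : pvCategory t = c <;> simp [h, ih]

-- ===== VERDICT (by name: the statement is the Claim_ definition above) =====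
theorem group_threats_spec : Claim_equal_group_threats := by
  intro threats _
  show group_threats threats = group_threats_alt threats
  unfold group_threats group_threats_alt
  rw [step_eq]
  rw [PySem.Dict.items_eq_map_keys _ (nodup_keys_A threats) []]
  rw [keys_A]
  apply List.map_congr_left
  intro c _
  rw [getD_A, filter_zip]
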